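-- pv_equiv track=rewrite | github.com/parkswon1/Coding_Test | 프로그래머스/푸드 파이트 대회.py | solution
-- ===== SOURCE A (Python) =====
-- def solution(food):
--     answer = ""
--     backStack = []
--     for i in range(1,len(food)):
--         count = food[i]//2
--         for j in range(count):
--             answer += str(i)
--             backStack.append(i)
--     answer += "0"
--     while(backStack):
--         answer += str(backStack.pop())
--     return answer
-- ===== SOURCE B (Python) =====
-- def solution(food):
--     # Build the palindrome inside-out: start from the center "0" and, walking the
--     # indices from the highest down to 1, wrap the current list of parts with that
--     # index's half-count piece on both ends; join once. No front-half accumulation,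
--     # no stack, no mirror pass.
--     parts = ["0"]
--     for i in range(len(food) - 1, 0, -1):
--         c = str(i) * (food[i] // 2)
--         parts.insert(0, c)
--         parts.append(c)
--     return "".join(parts)
-- ===== Notes on version B (the rewrite author's own statement) =====
-- stated objective: alternative
-- what changed: Replaces the two-phase build (accumulate the front half char by char while pushing a stack, then pop the stack to emit the mirror) with a single inside-out loop: starting from the center '0' it walks the indices downward and symmetrically wraps the parts list with each index's half-count piece on both ends, joining once at the end.
import Mathlib
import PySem

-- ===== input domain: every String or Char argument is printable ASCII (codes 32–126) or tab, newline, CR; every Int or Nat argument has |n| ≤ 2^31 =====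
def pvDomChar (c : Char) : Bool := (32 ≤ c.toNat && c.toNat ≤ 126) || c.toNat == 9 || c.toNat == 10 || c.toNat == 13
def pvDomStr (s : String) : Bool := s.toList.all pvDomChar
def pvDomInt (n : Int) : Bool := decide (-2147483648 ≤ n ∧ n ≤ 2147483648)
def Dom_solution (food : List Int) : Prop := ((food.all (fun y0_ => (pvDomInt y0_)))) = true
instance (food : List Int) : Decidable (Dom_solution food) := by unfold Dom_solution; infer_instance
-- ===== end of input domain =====

-- B builds the palindrome inside-out: from the center "0" it walks the indices downward and
-- symmetrically wraps the parts list with each index's piece on both ends, joining once —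
-- instead of A's front-half accumulation plus a stack popped for the mirror.

-- ===== PORT A =====
def solution (food : List Int) : String :=
  -- for i in range(1, len(food)): count = food[i]//2; for j in range(count): answer += str(i); backStack.append(i)
  let (answer, backStack) :=
    (PySem.List.pyRange 1 (food.length : Int) 1).foldl
      (fun (st : List Char × List Int) i =>
        let count := PySem.Int.floordiv (PySem.List.pyGetD food i 0) 2
        (PySem.List.pyRange 0 count 1).foldl
          (fun st2 _ => (st2.1 ++ PySem.Int.toChars i, st2.2 ++ [i])) st)
      ([], [])
  -- answer += "0"; while backStack: answer += str(backStack.pop())  (pop from the end = fold over the reverse)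
  String.ofList (backStack.reverse.foldl (fun a i => a ++ PySem.Int.toChars i) (answer ++ ['0']))

-- ===== PORT B =====
def solution_alt (food : List Int) : String :=
  -- parts = ["0"]; for i in range(len(food)-1, 0, -1): c = str(i)*(food[i]//2); parts.insert(0,c); parts.append(c)
  let parts := (PySem.List.pyRange ((food.length : Int) - 1) 0 (-1)).foldl
    (fun (parts : List (List Char)) i =>
      let c := PySem.List.pyRepeat (PySem.Int.toChars i)
                 (PySem.Int.floordiv (PySem.List.pyGetD food i 0) 2)
      (c :: parts) ++ [c])
    [['0']]
  -- return "".join(parts)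
  String.ofList parts.flatten

-- ===== PRECONDITION & SPEC =====
def Spec_solution (food : List Int) (out : String) : Prop := out = solution_alt food
instance (food : List Int) (out : String) : Decidable (Spec_solution food out) := by unfold Spec_solution; infer_instance

-- ===== CLAIM (what is proved, stated in full; the proofs are below) =====
def Claim_equal_solution : Prop := ∀ (food : List Int), Dom_solution food → Spec_solution food (solution food)

-- ===== LEMMAS AND PROOFS =====

-- the per-index piece of the front half
def pvPiece (food : List Int) (i : Int) : List Char :=
  PySem.List.pyRepeat (PySem.Int.toChars i) (PySem.Int.floordiv (PySem.List.pyGetD food i 0) 2)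

-- the inner 'for j in range(count)' loop, generalized over any list it folds over
theorem pv_inner (L : List Int) (t : List Char) (i : Int) (a : List Char) (s : List Int) :
    L.foldl (fun st2 _ => (st2.1 ++ t, st2.2 ++ [i])) (a, s)
      = (a ++ (List.replicate L.length t).flatten, s ++ List.replicate L.length i) := by
  induction L generalizing a s with
  | nil => simp
  | cons x xs ih =>
      simp only [List.foldl_cons, ih, List.length_cons, List.replicate_succ]
      simp

-- the outer loop accumulates the flattened pieces and the flattened replicate lists
theorem pv_outer (l : List Int) (food : List Int) (a : List Char) (s : List Int) :
    l.foldl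
      (fun (st : List Char × List Int) i =>
        let count := PySem.Int.floordiv (PySem.List.pyGetD food i 0) 2
        (PySem.List.pyRange 0 count 1).foldl
          (fun st2 _ => (st2.1 ++ PySem.Int.toChars i, st2.2 ++ [i])) st)
      (a, s)
      = (a ++ (l.map (pvPiece food)).flatten,
         s ++ (l.map (fun i => List.replicate
                (PySem.Int.floordiv (PySem.List.pyGetD food i 0) 2).toNat i)).flatten) := by
  induction l generalizing a s with
  | nil => simp
  | cons x xs ih =>
      simp only [List.foldl_cons, pv_inner, ih, List.map_cons, List.flatten_cons]
      simp [pvPiece, PySem.List.pyRepeat, PySem.List.length_pyRange_one, List.append_assoc]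

-- popping the stack emits, piece group by piece group, exactly the reversed pieces
theorem pv_mirror (l : List Int) (c : Int → Nat) :
    ((l.map (fun i => List.replicate (c i) i)).flatten.reverse.map PySem.Int.toChars).flatten
      = ((l.map (fun i => (List.replicate (c i) (PySem.Int.toChars i)).flatten)).reverse).flatten := by
  induction l with
  | nil => simp
  | cons x xs ih =>
      simp only [List.map_cons, List.flatten_cons, List.reverse_append, List.map_append,
        List.flatten_append, List.reverse_cons, List.reverse_replicate, List.map_replicate,
        List.flatten_nil, List.append_nil]
      rw [ih]

-- the pop while-loop as a fold appends the digit strings one after another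
theorem pv_poploop (L : List Int) (a : List Char) :
    L.foldl (fun a i => a ++ PySem.Int.toChars i) a = a ++ (L.map PySem.Int.toChars).flatten := by
  induction L generalizing a with
  | nil => simp
  | cons x xs ih => simp [ih, List.append_assoc]

-- B's inside-out wrapping, as a foldr over the ascending index list, produces
-- front pieces, the center, and the reversed pieces
theorem pv_wrap (l : List Int) (p : Int → List Char) :
    l.foldr (fun i parts => (p i :: parts) ++ [p i]) [['0']]
      = l.map p ++ ['0'] :: (l.map p).reverse := by
  induction l with
  | nil => simp
  | cons x xs ih => rw [List.foldr_cons, ih]; simp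

-- ===== VERDICT (by name: the statement is the Claim_ definition above) =====
theorem solution_spec : Claim_equal_solution := by
  intro food _
  show solution food = solution_alt food
  unfold solution solution_alt
  simp only [pv_outer, List.nil_append, pv_poploop]
  rw [show ((food.length : Int) - 1) = (0 : Int) + (food.length : Int) - 1 by ring,
     PySem.List.pyRange_neg_one_eq_reverse]
  simp only [List.foldl_reverse]
  rw [show (0 : Int) + (food.length : Int) - 1 + 1 = (food.length : Int) by ring]
  simp only [pv_wrap]
  congr 1
  have hp : ∀ i : Int, pvPiece food i
      = (List.replicate (PySem.Int.floordiv (PySem.List.pyGetD food i 0) 2).toNat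
          (PySem.Int.toChars i)).flatten := by
    intro i; simp [pvPiece, PySem.List.pyRepeat]
  rw [funext hp, pv_mirror]
  simp [List.append_assoc]
  simp [PySem.List.pyRepeat]
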